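-- pv_equiv track=rewrite | github.com/akashnag/ash | src/ash/utils/utils.py | get_message_dimensions
-- ===== SOURCE A (Python) =====
-- def get_message_dimensions(msg):
-- 	mlines = msg.count("\n") + 1
-- 	data = msg.split("\n")
-- 	mlen = 0
-- 	for line in data:
-- 		if(len(line) > mlen):
-- 			mlen = len(line)
-- 	return (mlines, mlen)
-- ===== SOURCE B (Python) =====
-- def get_message_dimensions(msg):
--     # Single character pass: no intermediate line list is built.
--     newlines = 0
--     cur = 0
--     mlen = 0
--     for ch in msg:
--         if ch == "\n":
--             newlines += 1
--             cur = 0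
--         else:
--             cur += 1
--             mlen = max(mlen, cur)
--     return (newlines + 1, mlen)
-- ===== Notes on version B (the rewrite author's own statement) =====
-- stated objective: alternative
-- what changed: One character-level pass maintaining a newline counter and a running current/maximum line length, instead of counting newlines, splitting into a line list and re-scanning it for the longest line.
import Mathlib
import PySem

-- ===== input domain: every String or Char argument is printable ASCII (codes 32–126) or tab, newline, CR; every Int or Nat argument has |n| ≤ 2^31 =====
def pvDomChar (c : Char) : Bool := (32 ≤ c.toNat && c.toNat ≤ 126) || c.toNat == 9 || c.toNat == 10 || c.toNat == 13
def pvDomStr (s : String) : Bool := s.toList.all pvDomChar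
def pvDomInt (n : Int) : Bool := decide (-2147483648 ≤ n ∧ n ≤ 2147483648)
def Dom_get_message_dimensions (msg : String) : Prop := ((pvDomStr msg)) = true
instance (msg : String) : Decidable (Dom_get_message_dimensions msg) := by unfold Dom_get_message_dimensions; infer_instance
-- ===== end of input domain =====

-- B replaces count+split+rescan with one character pass keeping a newline counter and a running line length (alternative decomposition).

-- ===== PORT A =====
def get_message_dimensions (msg : String) : Int × Int :=
  let mlines : Int := (PySem.Str.count msg "\n" : Int) + 1
  let data : List (List Char) := PySem.Chars.splitOn msg.toList "\n".toList  -- msg.split("\n"), sep ≠ ""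
  let mlen : Int := data.foldl (fun m line => if PySem.Chars.len line > m then PySem.Chars.len line else m) 0
  (mlines, mlen)

-- ===== PORT B =====
def get_message_dimensions_alt (msg : String) : Int × Int :=
  let r : Int × Int × Int := msg.toList.foldl
    (fun s ch => if ch = '\n' then (s.1 + 1, (0 : Int), s.2.2) else (s.1, s.2.1 + 1, max s.2.2 (s.2.1 + 1)))
    (0, 0, 0)
  (r.1 + 1, r.2.2)

-- ===== PRECONDITION & SPEC =====
def Spec_get_message_dimensions (msg : String) (out : Int × Int) : Prop := out = get_message_dimensions_alt msg
instance (msg : String) (out : Int × Int) : Decidable (Spec_get_message_dimensions msg out) := by unfold Spec_get_message_dimensions; infer_instance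

-- ===== CLAIM (what is proved, stated in full; the proofs are below) =====
def Claim_equal_get_message_dimensions : Prop := ∀ (msg : String), Dom_get_message_dimensions msg → Spec_get_message_dimensions msg (get_message_dimensions msg)

-- ===== LEMMAS AND PROOFS =====

-- A's split into lines, in the shape of splitOn's accumulator recursion
def pvParts : List Char → List Char → List (List Char)
  | [], cur => [cur.reverse]
  | c :: rest, cur => if c = '\n' then cur.reverse :: pvParts rest [] else pvParts rest (c :: cur)

theorem pvCountGo (l : List Char) : ∀ (fuel acc : Nat), l.length ≤ fuel →
    PySem.Chars.count.go ['\n'] fuel l acc = acc + l.count '\n' := by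
  induction l with
  | nil => intro fuel acc _; cases fuel <;> simp [PySem.Chars.count.go]
  | cons c rest ih =>
    intro fuel acc h
    cases fuel with
    | zero => simp at h
    | succ f =>
      simp only [PySem.Chars.count.go, List.isPrefixOf, List.count_cons]
      by_cases hc : c = '\n'
      · subst hc; simp [ih f (acc + 1) (by simpa using h)]; omega
      · have : ('\n' == c) = false := by simpa using fun h => hc h.symm
        simp [this, ih f acc (by simpa using h), hc]

theorem pvCount (cs : List Char) : PySem.Chars.count cs ['\n'] = cs.count '\n' := by
  simp [PySem.Chars.count, pvCountGo cs cs.length 0 le_rfl]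

theorem pvSplitGo (l : List Char) : ∀ (fuel : Nat) (cur : List Char) (acc : List (List Char)),
    l.length + 1 ≤ fuel →
    PySem.Chars.splitOn.go ['\n'] fuel l cur acc = acc.reverse ++ pvParts l cur := by
  induction l with
  | nil =>
    intro fuel cur acc h
    cases fuel with
    | zero => omega
    | succ f => simp [PySem.Chars.splitOn.go, pvParts]
  | cons c rest ih =>
    intro fuel cur acc h
    cases fuel with
    | zero => omega
    | succ f =>
      simp only [PySem.Chars.splitOn.go, List.isPrefixOf, pvParts]
      by_cases hc : c = '\n'
      · subst hc
        simp [ih f [] (cur.reverse :: acc) (by simpa using h)]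
      · have : ('\n' == c) = false := by simpa using fun h => hc h.symm
        simp [this, hc, ih f (c :: cur) acc (by simpa using h)]

theorem pvSplit (cs : List Char) : PySem.Chars.splitOn cs ['\n'] = pvParts cs [] := by
  simp [PySem.Chars.splitOn, pvSplitGo cs (cs.length + 1) [] [] le_rfl]

theorem pvParts_ne_nil (l cur : List Char) : pvParts l cur ≠ [] := by
  induction l generalizing cur with
  | nil => simp [pvParts]
  | cons c rest ih => by_cases hc : c = '\n' <;> simp [pvParts, hc, ih]

theorem pvGetLastD_ne {α : Type} (l : List α) (d d' : α) (h : l ≠ []) :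
    l.getLastD d = l.getLastD d' := by
  cases l with
  | nil => exact absurd rfl h
  | cons a as => rw [List.getLastD_cons, List.getLastD_cons]

theorem pvParts_head_len (l cur : List Char) :
    (cur.length : Int) ≤ (((pvParts l cur).headD []).length : Int) := by
  induction l generalizing cur with
  | nil => simp [pvParts]
  | cons c rest ih =>
    by_cases hc : c = '\n'
    · simp [pvParts, hc]
    · simp only [pvParts, hc, if_false]
      calc (cur.length : Int) ≤ ((c :: cur).length : Int) := by simp
        _ ≤ _ := ih (c :: cur)

theorem pvFoldMaxComm (ps : List (List Char)) : ∀ (m k : Int),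
    ps.foldl (fun m p => max m (p.length : Int)) (max m k)
      = max (ps.foldl (fun m p => max m (p.length : Int)) m) k := by
  induction ps with
  | nil => intro m k; rfl
  | cons p ps ih =>
    intro m k
    simp only [List.foldl_cons]
    rw [show max (max m k) (p.length : Int) = max (max m (p.length : Int)) k by
      omega, ih]

theorem pvMonoFoldMax (ps : List (List Char)) : ∀ (m : Int),
    m ≤ ps.foldl (fun m q => max m (q.length : Int)) m := by
  induction ps with
  | nil => intro m; simp
  | cons q ps ih => intro m; exact le_trans (le_max_left _ _) (ih _)

theorem pvLeFoldMax (ps : List (List Char)) : ∀ (m : Int) (p : List Char), p ∈ ps →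
    (p.length : Int) ≤ ps.foldl (fun m q => max m (q.length : Int)) m := by
  induction ps with
  | nil => intro m p h; simp at h
  | cons q ps ih =>
    intro m p h
    rcases List.mem_cons.mp h with h | h
    · subst h
      simp only [List.foldl_cons]
      exact le_trans (le_max_right _ _) (pvMonoFoldMax ps _)
    · exact ih _ p h

-- B's fold invariant: newline count, current line length and the running max against A's parts
theorem pvKey (l : List Char) : ∀ (cur : List Char) (nl mlen : Int), (cur.length : Int) ≤ mlen →
    l.foldl (fun s ch => if ch = '\n' then (s.1 + 1, (0 : Int), s.2.2) else (s.1, s.2.1 + 1, max s.2.2 (s.2.1 + 1)))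
        (nl, (cur.length : Int), mlen)
      = (nl + (l.count '\n' : Int), (((pvParts l cur).getLastD []).length : Int),
         (pvParts l cur).foldl (fun m p => max m (p.length : Int)) mlen) := by
  induction l with
  | nil => intro cur nl mlen h; simp [pvParts]; omega
  | cons c rest ih =>
    intro cur nl mlen h
    by_cases hc : c = '\n'
    · subst hc
      simp only [List.foldl_cons, pvParts, if_true]
      have h0 : ((0 : Int)) ≤ mlen := le_trans (by positivity) h
      have hrec := ih [] (nl + 1) mlen (by simpa using h0)
      simp only [List.length_nil, Int.natCast_zero] at hrec
      rw [hrec]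
      have hlast : (cur.reverse :: pvParts rest []).getLastD [] = (pvParts rest []).getLastD [] := by
        rw [List.getLastD_cons, pvGetLastD_ne _ _ _ (pvParts_ne_nil rest [])]
      have hm : max mlen ((cur.reverse.length : Int)) = mlen := by
        simp only [List.length_reverse]; omega
      rw [hm]
      simp only [Prod.mk.injEq, List.count_cons]
      refine ⟨by simp only [beq_self_eq_true, if_true]; push_cast; omega, by rw [hlast], trivial⟩
    · simp only [List.foldl_cons, pvParts, if_neg hc]
      have hlen : ((c :: cur).length : Int) = (cur.length : Int) + 1 := by simp
      have hrec := ih (c :: cur) nl (max mlen ((cur.length : Int) + 1)) (by rw [hlen]; exact le_max_right _ _)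
      rw [hlen] at hrec
      rw [hrec]
      have hmem : ((pvParts rest (c :: cur)).headD []) ∈ pvParts rest (c :: cur) := by
        cases hx : pvParts rest (c :: cur) with
        | nil => exact absurd hx (pvParts_ne_nil rest (c :: cur))
        | cons a as => simp
      have h1 : ((cur.length : Int) + 1) ≤ (((pvParts rest (c :: cur)).headD []).length : Int) := by
        have := pvParts_head_len rest (c :: cur); rw [hlen] at this; exact this
      have h2 := pvLeFoldMax (pvParts rest (c :: cur)) mlen _ hmem
      have h3 : (pvParts rest (c :: cur)).foldl (fun m p => max m ((p.length : Int))) (max mlen ((cur.length : Int) + 1))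
          = (pvParts rest (c :: cur)).foldl (fun m p => max m ((p.length : Int))) mlen := by
        rw [pvFoldMaxComm]; omega
      rw [h3]
      have hcc : (c == '\n') = false := by simpa using hc
      simp [List.count_cons, hcc]

theorem pvMstepEq (ps : List (List Char)) : ∀ (m : Int),
    ps.foldl (fun m line => if PySem.Chars.len line > m then PySem.Chars.len line else m) m
      = ps.foldl (fun m p => max m (p.length : Int)) m := by
  induction ps with
  | nil => intro m; rfl
  | cons p ps ih =>
    intro m
    simp only [List.foldl_cons]
    rw [show (if PySem.Chars.len p > m then PySem.Chars.len p else m) = max m ((p.length : Int)) by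
      simp only [PySem.Chars.len, gt_iff_lt]; split_ifs <;> omega]
    exact ih _

-- ===== VERDICT (by name: the statement is the Claim_ definition above) =====
theorem get_message_dimensions_spec : Claim_equal_get_message_dimensions := by
  intro msg _
  unfold Spec_get_message_dimensions get_message_dimensions get_message_dimensions_alt
  have hsep : ("\n".toList : List Char) = ['\n'] := by decide
  have hcnt : PySem.Str.count msg "\n" = msg.toList.count '\n' := by
    simp only [PySem.Str.count, hsep]; exact pvCount _
  have hkey := pvKey msg.toList [] 0 0 (by simp)
  simp only [List.length_nil, Int.natCast_zero] at hkey
  simp only [hsep, hcnt, pvSplit, pvMstepEq, hkey]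
  norm_num
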